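-- pv_equiv track=rewrite | github.com/ssorry123/ProblemSolving | 00_Kakao/자물쇠와열쇠.py | solution
-- ===== SOURCE A (Python) =====
-- def turn_right(key):
--     ''' 90도 회전 '''
--     m = len(key)
--     # 각 i번째 row들이 m-i번째 col이 된다
--     ret = list()
--     for _ in range(m):
--         ret.append([0]*m)
--
--     for r in range(m):
--         for c in range(m):
--             ret[c][m-r-1] = key[r][c]
--
--     return ret
--
-- def match(vr, vc, lock_blank_cnt, key, lock):
--     m = len(key)
--     n = len(lock)
--
--     for r in range(vr, vr+m):
--         for c in range(vc, vc+m):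
--             if r>=0 and c>=0 and r<n and c<n:
--                 # 키의 돌기가 lock의 홈을 채우는 경우
--                 if lock[r][c] == 0 and key[r-vr][c-vc] == 1:
--                     lock_blank_cnt -= 1
--                 # 돌기끼리 만나거나, 홈끼리 만나는 경우
--                 elif lock[r][c] == key[r-vr][c-vc]:
--                     return False
--                 # 키의 홈과, lock의 돌기가 만나는 경우
--                 else:
--                     continue
--
--     # lock의 홈을 키의 돌기로 다 채웠다면
--     if lock_blank_cnt == 0:
--         return True
--     else:
--         return False
--
-- def solution(key, lock):
--     # 각 정사각형 변의 길이 m, n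
--     m = len(key)
--     n = len(lock)
--
--     # lock을 채워야 하는 구멍의 수
--     lock_blank_cnt = 0
--     for row in lock:
--         lock_blank_cnt += row.count(0)
--
--     # 각 키를 회전시킨 배열 저장
--     key_lotation = [key]
--     for _ in range(3):
--         key_lotation.append(turn_right(key_lotation[-1]))
--
--     # 각 정사각형의 왼쪽위를 시작 지점이라 정하고,
--     # lock 시작지점 rc(0,0)을 원점으로 할때,
--     # key가 위치할 수 있는 가상의 좌표 rc(-(m-1), -(m-1)) ~ rc(n-1, n-1)
--     # ex)3*3, 3*3의 경우 key는 (-2,-2)~(2,2)에 위치할 수 있다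
--
--     # 4가지 종류의 키에 대하여
--     for k in key_lotation:
--         # key가 위치하였을때 맞을 가능성이있는 r, c
--         for r in range(-(m-1), n):
--             for c in range(-(m-1), n):
--                 # 하나라도 맞는 방법이 있으면
--                 if match(r, c, lock_blank_cnt, k, lock):
--                     return True
--
--     return False
-- ===== SOURCE B (Python) =====
-- def solution(key, lock):
--     m, n = len(key), len(lock)
--
--     def kv(t, r, c):
--         # value of key rotated t*90 degrees clockwise at (r, c); 0 outside the key square
--         if not (0 <= r < m and 0 <= c < m):
--             return 0
--         for _ in range(t):
--             r, c = m - 1 - c, r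
--         return key[r][c]
--
--     def fits(t, dr, dc):
--         # the placement works iff every lock cell is covered exactly right:
--         # a hole (0) must receive a key tooth (1); any other value must not meet its equal
--         for r in range(n):
--             for c in range(n):
--                 v = kv(t, r - dr, c - dc)
--                 if (v != 1) if lock[r][c] == 0 else (v == lock[r][c]):
--                     return False
--         return True
--
--     return any(fits(t, dr, dc)
--                for t in range(4)
--                for dr in range(1 - m, n)
--                for dc in range(1 - m, n))
-- ===== Notes on version B (the rewrite author's own statement) =====
-- stated objective: alternative
-- what changed: B drops A's materialised key rotations, per-row hole counter and early-exit window scan, and instead rotates coordinates arithmetically and checks every placement by a single per-lock-cell criterion (a hole must receive exactly a key tooth, any other value must not meet its equal).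
-- outside the precondition, e.g. on solution([[0]], [[1, 0]]): A returns False, B returns True
import Mathlib
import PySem

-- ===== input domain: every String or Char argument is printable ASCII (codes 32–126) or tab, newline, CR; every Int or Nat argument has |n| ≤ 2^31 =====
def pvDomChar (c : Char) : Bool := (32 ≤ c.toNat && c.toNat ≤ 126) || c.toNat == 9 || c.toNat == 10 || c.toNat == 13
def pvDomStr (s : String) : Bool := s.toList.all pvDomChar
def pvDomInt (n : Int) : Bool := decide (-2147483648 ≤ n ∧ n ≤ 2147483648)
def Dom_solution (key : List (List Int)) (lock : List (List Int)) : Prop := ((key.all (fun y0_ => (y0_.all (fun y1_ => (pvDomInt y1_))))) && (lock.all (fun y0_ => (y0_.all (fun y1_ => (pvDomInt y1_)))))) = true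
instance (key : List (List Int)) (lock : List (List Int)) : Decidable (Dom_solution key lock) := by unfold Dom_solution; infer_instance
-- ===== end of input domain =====

-- B replaces A's materialised rotations + hole counter with a per-cell criterion over the lock
-- (each lock cell must be covered exactly right), an alternative formulation of the same check.

-- ===== PORT A =====
-- g[i][j] with Python Int indexing; Pre_solution keeps every access in range, the defaults are never used
def pyAt2 (g : List (List Int)) (i : Int) (j : Int) : Int :=
  PySem.List.pyGetD (PySem.List.pyGetD g i []) j 0

-- ''' 90도 회전 ''' — ret[c][m-r-1] = key[r][c]
def turnRight (key : List (List Int)) : List (List Int) :=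
  let m := key.length
  let ret := List.replicate m (List.replicate m (0 : Int))
  (List.range m).foldl (fun ret r =>
    (List.range m).foldl (fun ret c =>
      ret.set c ((ret.getD c []).set (m - r - 1) (pyAt2 key (r : Int) (c : Int)))) ret) ret

-- match(vr, vc, lock_blank_cnt, key, lock); the early 'return False' is the 'none' state
def matchA (vr : Int) (vc : Int) (lockBlankCnt : Int) (key : List (List Int)) (lock : List (List Int)) : Bool :=
  let m : Int := key.length
  let n : Int := lock.length
  let st : Option Int :=
    (PySem.List.pyRange vr (vr + m) 1).foldl (fun st r =>
      (PySem.List.pyRange vc (vc + m) 1).foldl (fun st c =>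
        match st with
        | none => none
        | some cnt =>
          if 0 ≤ r ∧ 0 ≤ c ∧ r < n ∧ c < n then
            if pyAt2 lock r c = 0 ∧ pyAt2 key (r - vr) (c - vc) = 1 then some (cnt - 1)
            else if pyAt2 lock r c = pyAt2 key (r - vr) (c - vc) then none
            else some cnt
          else some cnt) st) (some lockBlankCnt)
  match st with
  | none => false
  | some cnt => cnt == 0

def solution (key : List (List Int)) (lock : List (List Int)) : Bool :=
  let m : Int := key.length
  let n : Int := lock.length
  let lockBlankCnt : Int := lock.foldl (fun acc row => acc + (PySem.List.count row 0 : Int)) 0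
  -- key_lotation = [key, turn_right key, …]
  let k0 := key
  let k1 := turnRight k0
  let k2 := turnRight k1
  let k3 := turnRight k2
  [k0, k1, k2, k3].any (fun k =>
    (PySem.List.pyRange (-(m - 1)) n 1).any (fun r =>
      (PySem.List.pyRange (-(m - 1)) n 1).any (fun c =>
        matchA r c lockBlankCnt k lock)))

-- ===== PORT B =====
-- kv(t, r, c): value of key rotated t*90° clockwise at (r, c); 0 outside the key square
def kvB (key : List (List Int)) (t : Nat) (r : Int) (c : Int) : Int :=
  let m : Int := key.length
  if 0 ≤ r ∧ r < m ∧ 0 ≤ c ∧ c < m then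
    let rc := (List.range t).foldl (fun (p : Int × Int) _ => (m - 1 - p.2, p.1)) (r, c)
    pyAt2 key rc.1 rc.2
  else 0

-- fits(t, dr, dc): every lock cell is covered exactly right
def fitsB (key : List (List Int)) (lock : List (List Int)) (t : Nat) (dr : Int) (dc : Int) : Bool :=
  let n : Int := lock.length
  (PySem.List.pyRange 0 n 1).all (fun r =>
    (PySem.List.pyRange 0 n 1).all (fun c =>
      let v := kvB key t (r - dr) (c - dc)
      !(if pyAt2 lock r c = 0 then v ≠ 1 else v = pyAt2 lock r c : Bool)))

def solution_alt (key : List (List Int)) (lock : List (List Int)) : Bool :=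
  let m : Int := key.length
  let n : Int := lock.length
  (List.range 4).any (fun t =>
    (PySem.List.pyRange (1 - m) n 1).any (fun dr =>
      (PySem.List.pyRange (1 - m) n 1).any (fun dc =>
        fitsB key lock t dr dc)))

-- ===== PRECONDITION & SPEC =====
-- Pre_ excludes ragged inputs: key rows shorter than len(key) or lock rows shorter than len(lock)
-- make A raise IndexError, and lock rows longer than len(lock) make A count holes outside the n×n
-- square that no placement can ever fill — an artefact of counting zeros over whole rows.
def Pre_solution (key : List (List Int)) (lock : List (List Int)) : Prop :=
  (∀ row ∈ key, key.length ≤ row.length) ∧ (∀ row ∈ lock, row.length = lock.length)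
instance (key : List (List Int)) (lock : List (List Int)) : Decidable (Pre_solution key lock) := by unfold Pre_solution; infer_instance

def pvWitness_solution : List (List Int) × List (List Int) :=
  ([[0, 0, 0], [1, 0, 0], [0, 1, 1]], [[1, 1, 1], [1, 1, 0], [1, 0, 1]])

def Spec_solution (key : List (List Int)) (lock : List (List Int)) (out : Bool) : Prop := out = solution_alt key lock
instance (key : List (List Int)) (lock : List (List Int)) (out : Bool) : Decidable (Spec_solution key lock out) := by unfold Spec_solution; infer_instance

-- ===== CLAIM (what is proved, stated in full; the proofs are below) =====
def Claim_equal_solution : Prop := ∀ (key : List (List Int)) (lock : List (List Int)), Dom_solution key lock → Pre_solution key lock → Spec_solution key lock (solution key lock)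

-- ===== LEMMAS AND PROOFS =====

-- Nat-indexed cell access; pyAt2 on cast indices computes it
def natCell (g : List (List Int)) (i j : Nat) : Int := (g.getD i []).getD j 0

lemma pyAt2_natCast (g : List (List Int)) (i j : Nat) :
    pyAt2 g (i : Int) (j : Int) = natCell g i j := by
  simp [pyAt2, natCell, PySem.List.pyGetD_natCast]

-- square shape
def Sq (g : List (List Int)) (m : Nat) : Prop := g.length = m ∧ ∀ row ∈ g, row.length = m

lemma getD_mem {g : List (List Int)} {a : Nat} (ha : a < g.length) : g.getD a [] ∈ g := by
  rw [List.getD_eq_getElem?_getD, List.getElem?_eq_getElem ha]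
  exact List.getElem_mem ha

lemma sq_set {g : List (List Int)} {m : Nat} (hsq : Sq g m) {a b : Nat} (ha : a < m) (v : Int) :
    Sq (g.set a ((g.getD a []).set b v)) m := by
  obtain ⟨hlen, hrows⟩ := hsq
  refine ⟨by simp [hlen], ?_⟩
  intro row hrow
  rcases List.mem_or_eq_of_mem_set hrow with h | h
  · exact hrows _ h
  · subst h; rw [List.length_set]; exact hrows _ (getD_mem (by omega))

lemma natCell_eq (g : List (List Int)) (i j : Nat) :
    natCell g i j = ((g[i]?.getD [])[j]?.getD 0) := by
  simp [natCell, List.getD_eq_getElem?_getD]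

lemma natCell_set {g : List (List Int)} {m : Nat} (hsq : Sq g m) {a b : Nat}
    (ha : a < m) (hb : b < m) (v : Int) (i j : Nat) :
    natCell (g.set a ((g.getD a []).set b v)) i j
      = if i = a ∧ j = b then v else natCell g i j := by
  obtain ⟨hlen, hrows⟩ := hsq
  have hrl : (g.getD a []).length = m := hrows _ (getD_mem (by omega))
  by_cases hia : i = a
  · subst hia
    rw [natCell_eq, natCell_eq, List.getElem?_set, if_pos rfl,
      if_pos (show i < g.length by omega)]
    simp only [Option.getD_some]
    by_cases hjb : j = b
    · subst hjb
      rw [List.getElem?_set, if_pos rfl, if_pos (show j < (g.getD i []).length by omega)]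
      simp
    · rw [List.getElem?_set, if_neg (fun h => hjb h.symm), if_neg (fun h => hjb h.2),
        List.getD_eq_getElem?_getD]
  · rw [natCell_eq, natCell_eq, List.getElem?_set, if_neg (fun h => hia h.symm),
      if_neg (fun h => hia h.1)]

-- the inner loop of turn_right for a fixed source row r, cut after k columns
def innerF (key : List (List Int)) (m r : Nat) (g : List (List Int)) (k : Nat) : List (List Int) :=
  (List.range k).foldl (fun g c =>
    g.set c ((g.getD c []).set (m - r - 1) (pyAt2 key (r : Int) (c : Int)))) g

lemma innerF_char (key : List (List Int)) (m r : Nat) (hr : r < m) :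
    ∀ (k : Nat), k ≤ m → ∀ (g : List (List Int)), Sq g m →
      Sq (innerF key m r g k) m ∧
      ∀ i j : Nat, i < m → j < m →
        natCell (innerF key m r g k) i j
          = if i < k ∧ j = m - r - 1 then pyAt2 key (r : Int) (i : Int) else natCell g i j := by
  intro k
  induction k with
  | zero =>
      intro _ g hsq
      refine ⟨hsq, ?_⟩
      intro i j _ _
      simp [innerF]
  | succ k ih =>
      intro hk g hsq
      obtain ⟨ihsq, ihcell⟩ := ih (by omega) g hsq
      have hkm : k < m := by omega
      have hstep : innerF key m r g (k + 1)
          = (innerF key m r g k).set k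
              (((innerF key m r g k).getD k []).set (m - r - 1) (pyAt2 key (r : Int) (k : Int))) := by
        unfold innerF
        rw [List.range_succ, List.foldl_append]
        rfl
      rw [hstep]
      refine ⟨sq_set ihsq hkm _, ?_⟩
      intro i j hi hj
      rw [natCell_set ihsq hkm (by omega) _ i j, ihcell i j hi hj]
      by_cases h1 : i = k ∧ j = m - r - 1
      · obtain ⟨rfl, rfl⟩ := h1
        rw [if_pos ⟨rfl, rfl⟩, if_pos ⟨Nat.lt_succ_self i, rfl⟩]
      · rw [if_neg h1]
        by_cases h2 : i < k ∧ j = m - r - 1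
        · rw [if_pos h2, if_pos ⟨by omega, h2.2⟩]
        · rw [if_neg h2, if_neg (by
            rintro ⟨hlt, hj2⟩
            rcases Nat.lt_succ_iff_lt_or_eq.mp hlt with h | h
            · exact h2 ⟨h, hj2⟩
            · exact h1 ⟨h, hj2⟩)]

-- the outer loop of turn_right cut after k source rows
def outerF (key : List (List Int)) (m : Nat) (k : Nat) : List (List Int) :=
  (List.range k).foldl (fun g r => innerF key m r g m)
    (List.replicate m (List.replicate m (0 : Int)))

lemma outerF_char (key : List (List Int)) (m : Nat) :
    ∀ (k : Nat), k ≤ m →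
      Sq (outerF key m k) m ∧
      ∀ i j : Nat, i < m → j < m →
        natCell (outerF key m k) i j
          = if m - 1 - j < k then pyAt2 key ((m - 1 - j : Nat) : Int) (i : Int) else 0 := by
  intro k
  induction k with
  | zero =>
      intro _
      constructor
      · show Sq (List.replicate m (List.replicate m (0 : Int))) m
        exact ⟨by simp, fun row h => by simp [List.eq_of_mem_replicate h]⟩
      · intro i j hi hj
        rw [if_neg (by omega)]
        show natCell (List.replicate m (List.replicate m 0)) i j = 0
        rw [natCell_eq]
        simp [hi, hj]
  | succ k ih =>
      intro hk
      obtain ⟨ihsq, ihcell⟩ := ih (by omega)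
      have hkm : k < m := by omega
      have hstep : outerF key m (k + 1) = innerF key m k (outerF key m k) m := by
        unfold outerF
        rw [List.range_succ, List.foldl_append]
        rfl
      rw [hstep]
      obtain ⟨hsq', hcell'⟩ := innerF_char key m k hkm m le_rfl (outerF key m k) ihsq
      refine ⟨hsq', ?_⟩
      intro i j hi hj
      rw [hcell' i j hi hj, ihcell i j hi hj]
      by_cases hj1 : j = m - k - 1
      · have hjk : m - 1 - j = k := by omega
        rw [if_pos ⟨hi, hj1⟩, if_pos (by omega), hjk]
      · have hjk : m - 1 - j ≠ k := by omega
        rw [if_neg (fun h => hj1 h.2)]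
        by_cases h2 : m - 1 - j < k
        · rw [if_pos h2, if_pos (by omega)]
        · rw [if_neg h2, if_neg (by omega)]

lemma turnRight_eq_outerF (key : List (List Int)) :
    turnRight key = outerF key key.length key.length := rfl

lemma turnRight_sq (key : List (List Int)) : Sq (turnRight key) key.length := by
  rw [turnRight_eq_outerF]; exact (outerF_char key key.length key.length le_rfl).1

lemma turnRight_cell (key : List (List Int)) (i j : Int)
    (h0 : 0 ≤ i) (h1 : i < (key.length : Int)) (h2 : 0 ≤ j) (h3 : j < (key.length : Int)) :
    pyAt2 (turnRight key) i j = pyAt2 key ((key.length : Int) - 1 - j) i := by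
  obtain ⟨i', rfl⟩ : ∃ a : Nat, (a : Int) = i := ⟨i.toNat, by omega⟩
  obtain ⟨j', rfl⟩ : ∃ a : Nat, (a : Int) = j := ⟨j.toNat, by omega⟩
  have hi : i' < key.length := by exact_mod_cast h1
  have hj : j' < key.length := by exact_mod_cast h3
  rw [turnRight_eq_outerF, pyAt2_natCast,
    (outerF_char key key.length key.length le_rfl).2 i' j' hi hj,
    if_pos (by omega)]
  congr 1
  omega

-- kvB on out-of-square coordinates
lemma kvB_not_win (key : List (List Int)) (t : Nat) (r c : Int)
    (h : ¬ (0 ≤ r ∧ r < (key.length : Int) ∧ 0 ≤ c ∧ c < (key.length : Int))) :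
    kvB key t r c = 0 := by
  simp only [kvB]
  rw [if_neg h]

-- the four rotations of the key, cell by cell, against B's coordinate transform
lemma kvB_rot0 (key : List (List Int)) (i j : Int)
    (h0 : 0 ≤ i) (h1 : i < (key.length : Int)) (h2 : 0 ≤ j) (h3 : j < (key.length : Int)) :
    pyAt2 key i j = kvB key 0 i j := by
  simp only [kvB]
  rw [if_pos ⟨h0, h1, h2, h3⟩]
  rfl

lemma kvB_rot1 (key : List (List Int)) (i j : Int)
    (h0 : 0 ≤ i) (h1 : i < (key.length : Int)) (h2 : 0 ≤ j) (h3 : j < (key.length : Int)) :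
    pyAt2 (turnRight key) i j = kvB key 1 i j := by
  rw [turnRight_cell key i j h0 h1 h2 h3]
  simp only [kvB]
  rw [if_pos ⟨h0, h1, h2, h3⟩]
  rfl

lemma kvB_rot2 (key : List (List Int)) (i j : Int)
    (h0 : 0 ≤ i) (h1 : i < (key.length : Int)) (h2 : 0 ≤ j) (h3 : j < (key.length : Int)) :
    pyAt2 (turnRight (turnRight key)) i j = kvB key 2 i j := by
  have hl : (turnRight key).length = key.length := (turnRight_sq key).1
  rw [turnRight_cell (turnRight key) i j h0 (by rw [hl]; exact h1) h2 (by rw [hl]; exact h3), hl,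
    turnRight_cell key ((key.length : Int) - 1 - j) i (by omega) (by omega) h0 h1]
  simp only [kvB]
  rw [if_pos ⟨h0, h1, h2, h3⟩]
  rfl

lemma kvB_rot3 (key : List (List Int)) (i j : Int)
    (h0 : 0 ≤ i) (h1 : i < (key.length : Int)) (h2 : 0 ≤ j) (h3 : j < (key.length : Int)) :
    pyAt2 (turnRight (turnRight (turnRight key))) i j = kvB key 3 i j := by
  have hl2 : (turnRight (turnRight key)).length = key.length :=
    ((turnRight_sq (turnRight key)).1).trans (turnRight_sq key).1
  rw [turnRight_cell (turnRight (turnRight key)) i j h0 (by rw [hl2]; exact h1) h2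
      (by rw [hl2]; exact h3), hl2,
    kvB_rot2 key ((key.length : Int) - 1 - j) i (by omega) (by omega) h0 h1]
  simp only [kvB]
  rw [if_pos (show (0:Int) ≤ (key.length : Int) - 1 - j ∧ (key.length : Int) - 1 - j < (key.length : Int) ∧ 0 ≤ i ∧ i < (key.length : Int) from ⟨by omega, by omega, h0, h1⟩),
    if_pos ⟨h0, h1, h2, h3⟩]
  rfl

-- nested fold over two ranges = fold over their product
lemma foldl_prod {γ : Type} (f : γ → Int → Int → γ) (l2 : List Int) :
    ∀ (l1 : List Int) (init : γ),
      l1.foldl (fun st a => l2.foldl (fun st b => f st a b) st) init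
        = (l1 ×ˢ l2).foldl (fun st p => f st p.1 p.2) init := by
  intro l1
  induction l1 with
  | nil => intro init; rfl
  | cons a l ih =>
      intro init
      show (l.foldl _ (l2.foldl _ init)) = ((l2.map (Prod.mk a) ++ l ×ˢ l2).foldl _ init)
      rw [List.foldl_append, ih, List.foldl_map]

-- A's match loop state machine: 'none' is the early 'return False'
def stepF (A B C : Int × Int → Bool) (st : Option Int) (p : Int × Int) : Option Int :=
  match st with
  | none => none
  | some cnt =>
    if A p then (if B p then some (cnt - 1) else if C p then none else some cnt) else some cnt

lemma stepF_none (A B C : Int × Int → Bool) (l : List (Int × Int)) :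
    l.foldl (stepF A B C) none = none := by
  induction l with
  | nil => rfl
  | cons p l ih => exact ih

lemma stepF_char (A B C : Int × Int → Bool) :
    ∀ (l : List (Int × Int)) (cnt : Int),
      l.foldl (stepF A B C) (some cnt)
        = if l.any (fun p => A p && !B p && C p) then none
          else some (cnt - l.countP (fun p => A p && B p)) := by
  intro l
  induction l with
  | nil => intro cnt; simp
  | cons p l ih =>
      intro cnt
      rw [List.foldl_cons]
      cases hA : A p
      · have hstep : stepF A B C (some cnt) p = some cnt := by simp [stepF, hA]
        have hbad : (A p && !B p && C p) = false := by simp [hA]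
        have hfill : (A p && B p) = false := by simp [hA]
        rw [hstep, ih cnt, List.any_cons, hbad, Bool.false_or, List.countP_cons, hfill]
        simp
      · cases hB : B p
        · cases hC : C p
          · have hstep : stepF A B C (some cnt) p = some cnt := by simp [stepF, hA, hB, hC]
            have hbad : (A p && !B p && C p) = false := by simp [hA, hB, hC]
            have hfill : (A p && B p) = false := by simp [hB]
            rw [hstep, ih cnt, List.any_cons, hbad, Bool.false_or, List.countP_cons, hfill]
            simp
          · have hstep : stepF A B C (some cnt) p = none := by simp [stepF, hA, hB, hC]
            have hbad : (A p && !B p && C p) = true := by simp [hA, hB, hC]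
            rw [hstep, stepF_none, List.any_cons, hbad, Bool.true_or, if_pos rfl]
        · have hstep : stepF A B C (some cnt) p = some (cnt - 1) := by simp [stepF, hA, hB]
          have hbad : (A p && !B p && C p) = false := by simp [hB]
          have hfill : (A p && B p) = true := by simp [hA, hB]
          have hcnt : List.countP (fun q => A q && B q) (p :: l)
              = List.countP (fun q => A q && B q) l + 1 := by
            simp [List.countP_cons, hfill]
          rw [hstep, ih (cnt - 1), List.any_cons, hbad, Bool.false_or, hcnt]
          by_cases h : l.any (fun q => A q && !B q && C q) = true
          · rw [if_pos h, if_pos h]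
          · rw [if_neg h, if_neg h]
            congr 1
            push_cast
            ring

-- count equality over two duplicate-free lists with the same relevant members
lemma countP_eq_of_mem_iff {l1 l2 : List (Int × Int)} (h1 : l1.Nodup) (h2 : l2.Nodup)
    (q : Int × Int → Bool) (h : ∀ p, q p = true → (p ∈ l1 ↔ p ∈ l2)) :
    l1.countP q = l2.countP q := by
  rw [List.countP_eq_length_filter, List.countP_eq_length_filter]
  refine List.Perm.length_eq ?_
  rw [List.perm_ext_iff_of_nodup (h1.filter q) (h2.filter q)]
  intro p
  simp only [List.mem_filter]
  constructor
  · rintro ⟨hm, hq⟩; exact ⟨(h p hq).mp hm, hq⟩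
  · rintro ⟨hm, hq⟩; exact ⟨(h p hq).mpr hm, hq⟩

-- two counts, one predicate implying the other, are equal iff the implication reverses on the list
lemma countP_eq_iff_forall {l : List (Int × Int)} {small big : Int × Int → Bool}
    (hmono : ∀ p ∈ l, small p = true → big p = true) :
    (l.countP big = l.countP small) ↔ ∀ p ∈ l, big p = true → small p = true := by
  induction l with
  | nil => simp
  | cons a l ih =>
      have hm' : ∀ p ∈ l, small p = true → big p = true :=
        fun p hp => hmono p (List.mem_cons_of_mem a hp)
      have hle : l.countP small ≤ l.countP big := List.countP_mono_left hm'
      cases hsa : small a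
      · cases hba : big a
        · rw [List.countP_cons_of_neg (by simp [hba]), List.countP_cons_of_neg (by simp [hsa]),
            ih hm']
          constructor
          · intro h p hp
            rcases List.mem_cons.mp hp with rfl | hp'
            · intro hbt; exact absurd hbt (by simp [hba])
            · exact h p hp'
          · intro h p hp
            exact h p (List.mem_cons_of_mem a hp)
        · rw [List.countP_cons_of_pos hba, List.countP_cons_of_neg (by simp [hsa])]
          apply iff_of_false
          · omega
          · intro hall
            have := hall a List.mem_cons_self hba
            simp [hsa] at this
      · have hba := hmono a List.mem_cons_self hsa
        rw [List.countP_cons_of_pos hba, List.countP_cons_of_pos hsa]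
        constructor
        · intro h p hp
          have heq : l.countP big = l.countP small := by omega
          rcases List.mem_cons.mp hp with rfl | hp'
          · intro _; exact hsa
          · exact (ih hm').mp heq p hp'
        · intro hall
          have : l.countP big = l.countP small :=
            (ih hm').mpr (fun p hp => hall p (List.mem_cons_of_mem a hp))
          omega

lemma countP_product (l1 l2 : List Int) (q : Int × Int → Bool) :
    (l1 ×ˢ l2).countP q = (l1.map (fun a => l2.countP (fun b => q (a, b)))).sum := by
  induction l1 with
  | nil => rfl
  | cons a l ih =>
      show ((l2.map (Prod.mk a) ++ l ×ˢ l2).countP q) = _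
      rw [List.countP_append, List.countP_map, ih]
      simp [Function.comp_def]

-- lock_blank_cnt = number of zero cells of the n×n lock square
lemma blank_eq (lock : List (List Int)) (hrows : ∀ row ∈ lock, row.length = lock.length) :
    lock.foldl (fun acc row => acc + (PySem.List.count row 0 : Int)) 0
      = (((PySem.List.pyRange 0 (lock.length : Int) 1 ×ˢ PySem.List.pyRange 0 (lock.length : Int) 1).countP
          (fun p => decide (pyAt2 lock p.1 p.2 = 0)) : Nat) : Int) := by
  rw [PySem.List.foldl_add, zero_add, countP_product]
  have hcast : ∀ ln : List Nat, ((ln.sum : Nat) : Int) = (ln.map (fun x : Nat => (x : Int))).sum := by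
    intro ln
    induction ln with
    | nil => simp
    | cons x l ih => simp [ih]
  rw [hcast, List.map_map]
  have hlock : (PySem.List.pyRange 0 (lock.length : Int) 1).map
      (fun j => PySem.List.pyGetD lock j []) = lock := by
    have h := PySem.List.map_pyGetD_pyRange_zero lock ([] : List Int)
    rwa [PySem.List.len_eq] at h
  conv_lhs => rw [show lock = (PySem.List.pyRange 0 (lock.length : Int) 1).map
      (fun j => PySem.List.pyGetD lock j []) from hlock.symm]
  rw [List.map_map]
  apply congrArg List.sum
  apply List.map_congr_left
  intro a ha
  obtain ⟨ha0, haN⟩ := PySem.List.mem_pyRange_one.mp ha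
  simp only [Function.comp_def]
  have hrowmem : PySem.List.pyGetD lock a [] ∈ lock :=
    PySem.List.pyGetD_mem lock [] (by constructor <;> omega)
  set row := PySem.List.pyGetD lock a [] with hrowdef
  have hrl : row.length = lock.length := hrows _ hrowmem
  have hinner : (PySem.List.pyRange 0 (lock.length : Int) 1).countP
      (fun b => decide (pyAt2 lock a b = 0)) = row.countP (fun v => decide (v = 0)) := by
    have h2 : (PySem.List.pyRange 0 (row.length : Int) 1).map
        (fun j => PySem.List.pyGetD row j (0 : Int)) = row := by
      have h := PySem.List.map_pyGetD_pyRange_zero row (0 : Int)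
      rwa [PySem.List.len_eq] at h
    conv_rhs => rw [show row = (PySem.List.pyRange 0 (row.length : Int) 1).map
        (fun j => PySem.List.pyGetD row j (0 : Int)) from h2.symm]
    rw [List.countP_map, hrl]
    apply List.countP_congr
    intro b _
    rfl
  rw [hinner, PySem.List.count_eq]
  rfl

-- Bool forms of the three branch tests of A's match
def inBB (lock : List (List Int)) (p : Int × Int) : Bool :=
  decide (0 ≤ p.1 ∧ 0 ≤ p.2 ∧ p.1 < (lock.length : Int) ∧ p.2 < (lock.length : Int))
def fillBB (key lock : List (List Int)) (vr vc : Int) (p : Int × Int) : Bool :=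
  decide (pyAt2 lock p.1 p.2 = 0 ∧ pyAt2 key (p.1 - vr) (p.2 - vc) = 1)
def collBB (key lock : List (List Int)) (vr vc : Int) (p : Int × Int) : Bool :=
  decide (pyAt2 lock p.1 p.2 = pyAt2 key (p.1 - vr) (p.2 - vc))

lemma foldl_prod_stepF (A B C : Int × Int → Bool) (l2 : List Int) (l1 : List Int) (init : Option Int) :
    l1.foldl (fun st a => l2.foldl (fun st b => stepF A B C st (a, b)) st) init
      = (l1 ×ˢ l2).foldl (stepF A B C) init := by
  rw [foldl_prod (fun st a b => stepF A B C st (a, b))]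

-- characterisation of A's match as a bad-overlap test plus a fill count
lemma matchA_char (vr vc cnt : Int) (key lock : List (List Int)) :
    matchA vr vc cnt key lock
      = (if ((PySem.List.pyRange vr (vr + (key.length : Int)) 1 ×ˢ
              PySem.List.pyRange vc (vc + (key.length : Int)) 1).any
              (fun p => inBB lock p && !fillBB key lock vr vc p && collBB key lock vr vc p))
         then false
         else ((cnt - ((PySem.List.pyRange vr (vr + (key.length : Int)) 1 ×ˢ
              PySem.List.pyRange vc (vc + (key.length : Int)) 1).countP
              (fun p => inBB lock p && fillBB key lock vr vc p) : Int)) == 0)) := by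
  have hbody : ∀ (st : Option Int) (r c : Int),
      (match st with
       | none => none
       | some cnt =>
         if 0 ≤ r ∧ 0 ≤ c ∧ r < (lock.length : Int) ∧ c < (lock.length : Int) then
           if pyAt2 lock r c = 0 ∧ pyAt2 key (r - vr) (c - vc) = 1 then some (cnt - 1)
           else if pyAt2 lock r c = pyAt2 key (r - vr) (c - vc) then none
           else some cnt
         else some cnt)
      = stepF (inBB lock) (fillBB key lock vr vc) (collBB key lock vr vc) st (r, c) := by
    intro st r c
    cases st with
    | none => rfl
    | some x =>
        simp only [stepF, inBB, fillBB, collBB]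
        by_cases h1 : (0:Int) ≤ r ∧ 0 ≤ c ∧ r < (lock.length : Int) ∧ c < (lock.length : Int) <;>
          by_cases h2 : pyAt2 lock r c = 0 ∧ pyAt2 key (r - vr) (c - vc) = 1 <;>
            by_cases h3 : pyAt2 lock r c = pyAt2 key (r - vr) (c - vc) <;>
              simp [h1, h2, h3]
  simp only [matchA]
  simp only [hbody]
  rw [foldl_prod_stepF, stepF_char]
  by_cases h : ((PySem.List.pyRange vr (vr + (key.length : Int)) 1 ×ˢ
      PySem.List.pyRange vc (vc + (key.length : Int)) 1).any
      (fun p => inBB lock p && !fillBB key lock vr vc p && collBB key lock vr vc p)) = true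
  · rw [if_pos h, if_pos h]
  · rw [if_neg h, if_neg h]

-- one placement: A's match on the t-th rotation = B's fits for t
lemma place_eq (key lock k : List (List Int)) (t : Nat) (vr vc : Int)
    (hlock : ∀ row ∈ lock, row.length = lock.length)
    (hlen : k.length = key.length)
    (hK : ∀ i j : Int, 0 ≤ i → i < (key.length : Int) → 0 ≤ j → j < (key.length : Int) →
      pyAt2 k i j = kvB key t i j) :
    matchA vr vc (lock.foldl (fun acc row => acc + (PySem.List.count row 0 : Int)) 0) k lock
      = fitsB key lock t vr vc := by
  rw [matchA_char, hlen, blank_eq lock hlock]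
  set M := (key.length : Int) with hM
  set N := (lock.length : Int) with hN
  set W := PySem.List.pyRange vr (vr + M) 1 ×ˢ PySem.List.pyRange vc (vc + M) 1 with hW
  set PL := PySem.List.pyRange 0 N 1 ×ˢ PySem.List.pyRange 0 N 1 with hPL
  have hWmem : ∀ p : Int × Int, p ∈ W ↔ ((vr ≤ p.1 ∧ p.1 < vr + M) ∧ (vc ≤ p.2 ∧ p.2 < vc + M)) := by
    rintro ⟨r, c⟩
    rw [hW]
    show (r, c) ∈ (PySem.List.pyRange vr (vr + M) 1).product (PySem.List.pyRange vc (vc + M) 1) ↔ _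
    rw [List.pair_mem_product]
    simp [PySem.List.mem_pyRange_one]
  have hPmem : ∀ p : Int × Int, p ∈ PL ↔ ((0 ≤ p.1 ∧ p.1 < N) ∧ (0 ≤ p.2 ∧ p.2 < N)) := by
    rintro ⟨r, c⟩
    rw [hPL]
    show (r, c) ∈ (PySem.List.pyRange 0 N 1).product (PySem.List.pyRange 0 N 1) ↔ _
    rw [List.pair_mem_product]
    simp [PySem.List.mem_pyRange_one]
  have hWnd : W.Nodup :=
    List.Nodup.product (PySem.List.nodup_pyRange_one _ _) (PySem.List.nodup_pyRange_one _ _)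
  have hPnd : PL.Nodup :=
    List.Nodup.product (PySem.List.nodup_pyRange_one _ _) (PySem.List.nodup_pyRange_one _ _)
  have hkv : ∀ p : Int × Int, ((vr ≤ p.1 ∧ p.1 < vr + M) ∧ (vc ≤ p.2 ∧ p.2 < vc + M)) →
      pyAt2 k (p.1 - vr) (p.2 - vc) = kvB key t (p.1 - vr) (p.2 - vc) := by
    intro p hp
    exact hK _ _ (by omega) (by omega) (by omega) (by omega)
  have hkv0 : ∀ p : Int × Int, ¬ ((vr ≤ p.1 ∧ p.1 < vr + M) ∧ (vc ≤ p.2 ∧ p.2 < vc + M)) →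
      kvB key t (p.1 - vr) (p.2 - vc) = 0 := by
    intro p hp
    refine kvB_not_win key t _ _ (fun hcon => hp ?_)
    obtain ⟨a, b, c, d⟩ := hcon
    exact ⟨⟨by omega, by omega⟩, by omega, by omega⟩
  set q : Int × Int → Bool := fun p =>
    decide (((vr ≤ p.1 ∧ p.1 < vr + M) ∧ (vc ≤ p.2 ∧ p.2 < vc + M)) ∧
            ((0 ≤ p.1 ∧ p.1 < N) ∧ (0 ≤ p.2 ∧ p.2 < N)) ∧
            pyAt2 lock p.1 p.2 = 0 ∧ pyAt2 k (p.1 - vr) (p.2 - vc) = 1) with hq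
  have hWq : W.countP (fun p => inBB lock p && fillBB k lock vr vc p) = W.countP q := by
    apply List.countP_congr
    intro p hp
    have hw := (hWmem p).mp hp
    simp only [inBB, fillBB, hq, Bool.and_eq_true, decide_eq_true_eq]
    constructor
    · rintro ⟨ha, hb⟩; exact ⟨hw, ⟨⟨ha.1, ha.2.2.1⟩, ha.2.1, ha.2.2.2⟩, hb⟩
    · rintro ⟨-, hb, hc⟩; exact ⟨⟨hb.1.1, hb.2.1, hb.1.2, hb.2.2⟩, hc⟩
  have hWPq : W.countP q = PL.countP q := by
    refine countP_eq_of_mem_iff hWnd hPnd q ?_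
    intro p hqt
    have hqp := of_decide_eq_true hqt
    rw [hWmem, hPmem]
    exact iff_of_true hqp.1 hqp.2.1
  have hmono : ∀ p ∈ PL, q p = true → (decide (pyAt2 lock p.1 p.2 = 0)) = true := by
    intro p _ hqt
    exact decide_eq_true (of_decide_eq_true hqt).2.2.1
  have hbadiff : ((W.any (fun p => inBB lock p && !fillBB k lock vr vc p && collBB k lock vr vc p)) = true)
      ↔ ∃ p : Int × Int, ((vr ≤ p.1 ∧ p.1 < vr + M) ∧ (vc ≤ p.2 ∧ p.2 < vc + M)) ∧
          ((0 ≤ p.1 ∧ p.1 < N) ∧ (0 ≤ p.2 ∧ p.2 < N)) ∧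
          ¬ (pyAt2 lock p.1 p.2 = 0 ∧ pyAt2 k (p.1 - vr) (p.2 - vc) = 1) ∧
          pyAt2 lock p.1 p.2 = pyAt2 k (p.1 - vr) (p.2 - vc) := by
    rw [List.any_eq_true]
    constructor
    · rintro ⟨p, hp, hb⟩
      have hw := (hWmem p).mp hp
      simp only [inBB, fillBB, collBB, Bool.and_eq_true, Bool.not_eq_true',
        decide_eq_true_eq, decide_eq_false_iff_not] at hb
      exact ⟨p, hw, ⟨⟨hb.1.1.1, hb.1.1.2.2.1⟩, hb.1.1.2.1, hb.1.1.2.2.2⟩, hb.1.2, hb.2⟩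
    · rintro ⟨p, hw, hin, hnf, hc⟩
      refine ⟨p, (hWmem p).mpr hw, ?_⟩
      simp only [inBB, fillBB, collBB, Bool.and_eq_true, Bool.not_eq_true',
        decide_eq_true_eq, decide_eq_false_iff_not]
      exact ⟨⟨⟨hin.1.1, hin.2.1, hin.1.2, hin.2.2⟩, hnf⟩, hc⟩
  have hfits : (fitsB key lock t vr vc = true) ↔
      ∀ p : Int × Int, ((0 ≤ p.1 ∧ p.1 < N) ∧ (0 ≤ p.2 ∧ p.2 < N)) →
        (if pyAt2 lock p.1 p.2 = 0 then kvB key t (p.1 - vr) (p.2 - vc) = 1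
         else ¬ (kvB key t (p.1 - vr) (p.2 - vc) = pyAt2 lock p.1 p.2)) := by
    simp only [fitsB, List.all_eq_true, PySem.List.mem_pyRange_one]
    constructor
    · intro h p hp
      have hb := h p.1 ⟨hp.1.1, hp.1.2⟩ p.2 ⟨hp.2.1, hp.2.2⟩
      revert hb
      by_cases hL : pyAt2 lock p.1 p.2 = 0 <;> simp [hL]
    · intro h r hr c hc
      have hb := h (r, c) ⟨hr, hc⟩
      revert hb
      by_cases hL : pyAt2 lock r c = 0 <;> simp [hL]
  by_cases hbad : (W.any (fun p => inBB lock p && !fillBB k lock vr vc p && collBB k lock vr vc p)) = true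
  · rw [if_pos hbad]
    obtain ⟨p, hwin, hinb, hnfill, hcoll⟩ := hbadiff.mp hbad
    symm
    rw [Bool.eq_false_iff]
    intro hft
    have hgood := hfits.mp hft p hinb
    rw [hkv p hwin] at hcoll hnfill
    by_cases hL : pyAt2 lock p.1 p.2 = 0
    · rw [if_pos hL] at hgood
      exact hnfill ⟨hL, hgood⟩
    · rw [if_neg hL] at hgood
      exact hgood hcoll.symm
  · rw [if_neg hbad]
    have hnobad : ¬ ∃ p : Int × Int, ((vr ≤ p.1 ∧ p.1 < vr + M) ∧ (vc ≤ p.2 ∧ p.2 < vc + M)) ∧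
        ((0 ≤ p.1 ∧ p.1 < N) ∧ (0 ≤ p.2 ∧ p.2 < N)) ∧
        ¬ (pyAt2 lock p.1 p.2 = 0 ∧ pyAt2 k (p.1 - vr) (p.2 - vc) = 1) ∧
        pyAt2 lock p.1 p.2 = pyAt2 k (p.1 - vr) (p.2 - vc) :=
      fun hex => hbad (hbadiff.mpr hex)
    rw [Bool.eq_iff_iff]
    simp only [beq_iff_eq]
    rw [hfits, hWq, hWPq]
    constructor
    · intro hzf
      have hZ : PL.countP (fun p => decide (pyAt2 lock p.1 p.2 = 0)) = PL.countP q := by omega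
      have hforall := (countP_eq_iff_forall hmono).mp hZ
      intro p hp
      by_cases hL : pyAt2 lock p.1 p.2 = 0
      · rw [if_pos hL]
        have hqp := of_decide_eq_true (hforall p ((hPmem p).mpr hp) (decide_eq_true hL))
        rw [← hkv p hqp.1]
        exact hqp.2.2.2
      · rw [if_neg hL]
        intro hveq
        by_cases hw : ((vr ≤ p.1 ∧ p.1 < vr + M) ∧ (vc ≤ p.2 ∧ p.2 < vc + M))
        · rw [← hkv p hw] at hveq
          exact hnobad ⟨p, hw, hp, fun hf => hL hf.1, hveq.symm⟩
        · rw [hkv0 p hw] at hveq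
          exact hL hveq.symm
    · intro hgood
      have hforall : ∀ p ∈ PL, (decide (pyAt2 lock p.1 p.2 = 0)) = true → q p = true := by
        intro p hpl hLd
        have hL := of_decide_eq_true hLd
        have hp := (hPmem p).mp hpl
        have hg := hgood p hp
        rw [if_pos hL] at hg
        have hw : ((vr ≤ p.1 ∧ p.1 < vr + M) ∧ (vc ≤ p.2 ∧ p.2 < vc + M)) := by
          by_contra hnw
          rw [hkv0 p hnw] at hg
          exact absurd hg (by norm_num)
        refine decide_eq_true ⟨hw, hp, hL, ?_⟩
        rw [hkv p hw]
        exact hg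
      have := (countP_eq_iff_forall hmono).mpr hforall
      omega

-- ===== VERDICT (by name: the statement is the Claim_ definition above) =====
theorem solution_spec : Claim_equal_solution := by
  intro key lock _ hpre
  unfold Spec_solution
  obtain ⟨-, hlock⟩ := hpre
  simp only [solution, solution_alt]
  rw [show List.range 4 = [0, 1, 2, 3] from rfl]
  simp only [List.any_cons, List.any_nil, Bool.or_false]
  have harg : -((key.length : Int) - 1) = 1 - (key.length : Int) := by ring
  rw [harg]
  have hl1 : (turnRight key).length = key.length := (turnRight_sq key).1
  have hl2 : (turnRight (turnRight key)).length = key.length :=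
    ((turnRight_sq (turnRight key)).1).trans hl1
  have hl3 : (turnRight (turnRight (turnRight key))).length = key.length :=
    ((turnRight_sq (turnRight (turnRight key))).1).trans hl2
  congr 1
  · exact List.any_congr rfl fun r => List.any_congr rfl fun c =>
      place_eq key lock key 0 r c hlock rfl
        (fun i j a b c' d => kvB_rot0 key i j a b c' d)
  congr 1
  · exact List.any_congr rfl fun r => List.any_congr rfl fun c =>
      place_eq key lock (turnRight key) 1 r c hlock hl1
        (fun i j a b c' d => kvB_rot1 key i j a b c' d)
  congr 1
  · exact List.any_congr rfl fun r => List.any_congr rfl fun c =>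
      place_eq key lock (turnRight (turnRight key)) 2 r c hlock hl2
        (fun i j a b c' d => kvB_rot2 key i j a b c' d)
  · exact List.any_congr rfl fun r => List.any_congr rfl fun c =>
      place_eq key lock (turnRight (turnRight (turnRight key))) 3 r c hlock hl3
        (fun i j a b c' d => kvB_rot3 key i j a b c' d)
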